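-- pv_equiv track=rewrite | github.com/DovRine/neuralink-compression-challenge-solution | python/utilities/__init__.py | count_unique_tuples
-- ===== SOURCE A (Python) =====
-- from typing import List, Tuple
--
-- def count_unique_tuples(tuple_array: List[Tuple[int, int]]) -> dict:
--     """ Count the number of unique tuples in a list.
--
--     Args:
--         tuple_array (List[Tuple[int, int]]): A list of tuples.
--
--     Returns:
--         dict: A dictionary of unique tuples and their counts.
--     """
--     tuple_counts = {}
--
--     for compressed_tuple in tuple_array:
--         # Check if the tuple is already in the dictionary
--         if compressed_tuple in tuple_counts:
--             # If it is, increment the count by 1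
--             tuple_counts[compressed_tuple] += 1
--         else:
--             # If it is not, add it to the dictionary with a count of 1
--             tuple_counts[compressed_tuple] = 1
--
--     return tuple_counts
-- ===== SOURCE B (Python) =====
-- from typing import List, Tuple
--
-- def count_unique_tuples(tuple_array: List[Tuple[int, int]]) -> dict:
--     # Comprehension over the first-occurrence-ordered distinct tuples,
--     # counting each with list.count, instead of A's running-counter loop.
--     return {t: tuple_array.count(t) for t in dict.fromkeys(tuple_array)}
-- ===== Notes on version B (the rewrite author's own statement) =====
-- stated objective: idiomatic
-- what changed: A keeps a running counter dict updated element by element; B first deduplicates the tuples in first-occurrence order with dict.fromkeys and then builds the result in one comprehension using list.count per distinct tuple.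
import Mathlib
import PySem

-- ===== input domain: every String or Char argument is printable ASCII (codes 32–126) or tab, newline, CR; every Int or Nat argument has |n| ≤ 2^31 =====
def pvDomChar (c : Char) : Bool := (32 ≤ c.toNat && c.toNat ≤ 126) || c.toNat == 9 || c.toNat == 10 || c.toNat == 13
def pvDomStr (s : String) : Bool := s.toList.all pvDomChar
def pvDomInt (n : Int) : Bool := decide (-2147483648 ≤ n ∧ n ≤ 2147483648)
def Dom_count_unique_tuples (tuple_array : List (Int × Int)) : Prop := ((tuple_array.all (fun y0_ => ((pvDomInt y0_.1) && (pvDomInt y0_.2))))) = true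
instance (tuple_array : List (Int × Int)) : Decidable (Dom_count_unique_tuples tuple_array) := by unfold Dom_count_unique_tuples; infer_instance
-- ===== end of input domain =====

-- B replaces A's running-counter loop by dedup-then-count (idiomatic, not faster);
-- the dict is returned as its items list in insertion order, (key1, key2, count).

-- ===== PORT A =====
-- for t in tuple_array: if t in d: d[t] += 1 else: d[t] = 1; return d
def count_unique_tuples (tuple_array : List (Int × Int)) : List (Int × Int × Int) :=
  let d := tuple_array.foldl
    (fun d t => if d.contains t then d.modify t 0 (· + 1) else d.insert t 1)
    (PySem.Dict.empty : PySem.Dict (Int × Int) Int)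
  d.items.map (fun p => (p.1.1, p.1.2, p.2))

-- ===== PORT B =====
-- {t: tuple_array.count(t) for t in dict.fromkeys(tuple_array)}
def count_unique_tuples_alt (tuple_array : List (Int × Int)) : List (Int × Int × Int) :=
  (PySem.List.dedup tuple_array).map
    (fun t => (t.1, t.2, (tuple_array.count t : Int)))

-- ===== PRECONDITION & SPEC =====
def Spec_count_unique_tuples (tuple_array : List (Int × Int)) (out : List (Int × Int × Int)) : Prop := out = count_unique_tuples_alt tuple_array
instance (tuple_array : List (Int × Int)) (out : List (Int × Int × Int)) : Decidable (Spec_count_unique_tuples tuple_array out) := by unfold Spec_count_unique_tuples; infer_instance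

-- ===== CLAIM (what is proved, stated in full; the proofs are below) =====
def Claim_equal_count_unique_tuples : Prop := ∀ (tuple_array : List (Int × Int)), Dom_count_unique_tuples tuple_array → Spec_count_unique_tuples tuple_array (count_unique_tuples tuple_array)

-- ===== LEMMAS AND PROOFS =====

-- A's loop body is exactly the Counter step: on an absent key, modify t 0 (·+1) inserts 1.
lemma cut_step_eq (d : PySem.Dict (Int × Int) Int) (t : Int × Int) :
    (if d.contains t then d.modify t 0 (· + 1) else d.insert t 1)
      = d.modify t 0 (· + 1) := by
  by_cases h : d.contains t = true
  · simp [h]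
  · have hm : d.modify t 0 (· + 1) = d.insert t (d.getD t 0 + 1) :=
      PySem.Dict.ext_iff.mpr rfl
    have hg : d.getD t 0 = 0 :=
      PySem.Dict.getD_of_not_contains d 0 (by simpa using h)
    simp [h, hm, hg]

-- ===== VERDICT (by name: the statement is the Claim_ definition above) =====
theorem count_unique_tuples_spec : Claim_equal_count_unique_tuples := by
  intro xs _
  show count_unique_tuples xs = count_unique_tuples_alt xs
  unfold count_unique_tuples count_unique_tuples_alt
  simp only [cut_step_eq]
  rw [← PySem.Dict.counter_eq_foldl, PySem.Dict.items_counter]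
  simp [List.map_map, Function.comp]
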